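-- pv_equiv track=rewrite | github.com/BlueberryOreo/2021Python | 考试/11-24考试/2127405068.py | func7
-- ===== SOURCE A (Python) =====
-- def func7(lst):
--     if lst == []:
--         return lst
--
--     nums_j = []
--     nums_o = []
--     for i in lst:
--         if i % 2 == 0:
--             nums_o.append(i)
--         else:
--             nums_j.append(i)
--
--     nums_j.sort()
--     nums_o.sort(reverse=True)
--     return nums_j + nums_o
-- ===== SOURCE B (Python) =====
-- def _before(a, b):
--     # total strict "comes first" order: odds before evens, odds ascending, evens descending
--     if a % 2 != 0:
--         return b % 2 == 0 or a < b
--     else: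
--         return b % 2 == 0 and b < a
--
-- def _merge(xs, ys):
--     res = []
--     i = j = 0
--     while i < len(xs) and j < len(ys):
--         if _before(ys[j], xs[i]):
--             res.append(ys[j]); j += 1
--         else:
--             res.append(xs[i]); i += 1
--     res += xs[i:]
--     res += ys[j:]
--     return res
--
-- def func7(lst):
--     if len(lst) <= 1:
--         return list(lst)
--     mid = len(lst) // 2
--     return _merge(func7(lst[:mid]), func7(lst[mid:]))
-- ===== Notes on version B (the rewrite author's own statement) =====
-- stated objective: alternative
-- what changed: B replaces A's partition-then-two-library-sorts with a single hand-written top-down merge sort of the whole list under one total comparator (odds first ascending, then evens descending), so there is no partition pass and no library sort.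
import Mathlib
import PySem

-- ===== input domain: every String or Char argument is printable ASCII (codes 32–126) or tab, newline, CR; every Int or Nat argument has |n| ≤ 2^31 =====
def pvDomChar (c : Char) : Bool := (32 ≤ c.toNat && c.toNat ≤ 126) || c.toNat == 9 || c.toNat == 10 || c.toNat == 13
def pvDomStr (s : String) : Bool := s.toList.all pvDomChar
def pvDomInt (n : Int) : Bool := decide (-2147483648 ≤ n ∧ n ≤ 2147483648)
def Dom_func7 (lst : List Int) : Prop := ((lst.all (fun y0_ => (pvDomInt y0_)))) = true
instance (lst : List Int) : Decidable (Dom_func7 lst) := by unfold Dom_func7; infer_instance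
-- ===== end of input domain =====

-- B is a single hand-written top-down merge sort of the whole list under one total comparator
-- (odds first, ascending; then evens, descending) instead of A's partition + two library sorts.
-- Objective: alternative.

-- ===== PORT A =====
def func7 (lst : List Int) : List Int :=
  if lst == [] then lst
  else
    let p := lst.foldl
      (fun (acc : List Int × List Int) i =>
        if PySem.Int.mod i 2 == 0 then (acc.1, acc.2 ++ [i]) else (acc.1 ++ [i], acc.2))
      ([], [])
    PySem.List.sorted p.1 (fun x => x) false ++ PySem.List.sorted p.2 (fun x => x) true

-- ===== PORT B =====
-- _before(a, b): a comes strictly before b in the final order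
def pvBefore (a b : Int) : Bool :=
  if PySem.Int.mod a 2 != 0 then (PySem.Int.mod b 2 == 0) || decide (a < b)
  else (PySem.Int.mod b 2 == 0) && decide (b < a)

-- Source B's _merge: two-pointer merge; when one side is exhausted the remainder is appended
def pvMerge : List Int → List Int → List Int
  | [], ys => ys
  | x :: xs, [] => x :: xs
  | x :: xs, y :: ys =>
      if pvBefore y x then y :: pvMerge (x :: xs) ys else x :: pvMerge xs (y :: ys)

-- Source B's func7: top-down merge sort; lst[:mid]/lst[mid:] with 0 ≤ mid ≤ len are take/drop (exact here)
def func7_alt (lst : List Int) : List Int :=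
  if lst.length ≤ 1 then lst
  else
    pvMerge (func7_alt (lst.take (lst.length / 2))) (func7_alt (lst.drop (lst.length / 2)))
termination_by lst.length
decreasing_by
  · simp only [List.length_take]; omega
  · simp only [List.length_drop]; omega

-- ===== PRECONDITION & SPEC =====
def Spec_func7 (lst : List Int) (out : List Int) : Prop := out = func7_alt lst
instance (lst : List Int) (out : List Int) : Decidable (Spec_func7 lst out) := by unfold Spec_func7; infer_instance

-- ===== CLAIM (what is proved, stated in full; the proofs are below) =====
def Claim_equal_func7 : Prop := ∀ (lst : List Int), Dom_func7 lst → Spec_func7 lst (func7 lst)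

-- ===== LEMMAS AND PROOFS =====

-- the reflexive closure of the comparator: a non-strict total order on Int
def pvLe (a b : Int) : Prop := pvBefore a b = true ∨ a = b

theorem pvBefore_iff (a b : Int) :
    pvBefore a b = true ↔
      ((a % 2 ≠ 0 ∧ (b % 2 = 0 ∨ a < b)) ∨ (a % 2 = 0 ∧ b % 2 = 0 ∧ b < a)) := by
  have h2 : (2:Int) ≠ 0 := by norm_num
  simp only [pvBefore, PySem.Int.mod, Int.fmod_eq_emod, bne_iff_ne, ne_eq]
  by_cases ha : a % 2 = 0 <;> by_cases hb : b % 2 = 0 <;> simp [ha, hb]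

theorem pvLe_total (a b : Int) : pvLe a b ∨ pvLe b a := by
  unfold pvLe
  rw [pvBefore_iff, pvBefore_iff]
  omega

theorem pvLe_antisymm (a b : Int) : pvLe a b → pvLe b a → a = b := by
  unfold pvLe
  rw [pvBefore_iff, pvBefore_iff]
  omega

theorem pvLe_trans (a b c : Int) : pvLe a b → pvLe b c → pvLe a c := by
  unfold pvLe
  rw [pvBefore_iff, pvBefore_iff, pvBefore_iff]
  omega

-- merge is a permutation of the two inputs
theorem pvMerge_perm (xs ys : List Int) : (pvMerge xs ys).Perm (xs ++ ys) := by
  induction xs, ys using pvMerge.induct with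
  | case1 ys => simp [pvMerge]
  | case2 x xs => simp [pvMerge]
  | case3 x xs y ys h ih =>
    simp only [pvMerge, h]
    exact (ih.cons y).trans (List.perm_middle).symm
  | case4 x xs y ys h ih =>
    simp only [pvMerge, h]
    exact ih.cons x

theorem pvMerge_mem (xs ys : List Int) (z : Int) :
    z ∈ pvMerge xs ys ↔ z ∈ xs ∨ z ∈ ys := by
  rw [(pvMerge_perm xs ys).mem_iff, List.mem_append]

-- merging two pvLe-sorted lists yields a pvLe-sorted list
theorem pvMerge_pairwise (xs ys : List Int)
    (hx : xs.Pairwise pvLe) (hy : ys.Pairwise pvLe) :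
    (pvMerge xs ys).Pairwise pvLe := by
  induction xs, ys using pvMerge.induct with
  | case1 ys => simpa [pvMerge] using hy
  | case2 x xs => simpa [pvMerge] using hx
  | case3 x xs y ys h ih =>
    rcases List.pairwise_cons.mp hy with ⟨hy1, hy2⟩
    rcases List.pairwise_cons.mp hx with ⟨hx1, hx2⟩
    simp only [pvMerge, h]
    refine List.pairwise_cons.mpr ⟨?_, ih hx hy2⟩
    intro z hz
    rcases (pvMerge_mem _ _ z).mp hz with hz | hz
    · rcases List.mem_cons.mp hz with rfl | hz
      · exact Or.inl h
      · exact pvLe_trans y x z (Or.inl h) (hx1 z hz)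
    · exact hy1 z hz
  | case4 x xs y ys h ih =>
    rcases List.pairwise_cons.mp hy with ⟨hy1, hy2⟩
    rcases List.pairwise_cons.mp hx with ⟨hx1, hx2⟩
    have hxy : pvLe x y := by
      rcases pvLe_total x y with h' | h'
      · exact h'
      · rcases h' with h' | h'
        · exact absurd h' (by simpa using h)
        · exact Or.inr h'.symm
    simp only [pvMerge, h]
    refine List.pairwise_cons.mpr ⟨?_, ih hx2 hy⟩
    intro z hz
    rcases (pvMerge_mem _ _ z).mp hz with hz | hz
    · exact hx1 z hz
    · rcases List.mem_cons.mp hz with rfl | hz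
      · exact hxy
      · exact pvLe_trans x y z hxy (hy1 z hz)

-- B's merge sort: a permutation of the input, pairwise pvLe
theorem func7_alt_perm (lst : List Int) : (func7_alt lst).Perm lst := by
  induction lst using func7_alt.induct with
  | case1 lst h => rw [func7_alt]; simp [h]
  | case2 lst h ih1 ih2 =>
    rw [func7_alt, if_neg h]
    refine (pvMerge_perm _ _).trans ?_
    refine (ih1.append ih2).trans ?_
    rw [List.take_append_drop]

theorem func7_alt_pairwise (lst : List Int) : (func7_alt lst).Pairwise pvLe := by
  induction lst using func7_alt.induct with
  | case1 lst h =>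
    rw [func7_alt, if_pos h]
    match lst, h with
    | [], _ => exact List.Pairwise.nil
    | [x], _ => simp
  | case2 lst h ih1 ih2 =>
    rw [func7_alt, if_neg h]
    exact pvMerge_pairwise _ _ ih1 ih2

-- A's loop builds exactly the two parity filters of lst, appended to the accumulators.
theorem func7_loop (p : Int → Bool) (l j o : List Int) :
    l.foldl
      (fun (acc : List Int × List Int) i =>
        if p i then (acc.1, acc.2 ++ [i]) else (acc.1 ++ [i], acc.2))
      (j, o)
    = (j ++ l.filter (fun x => !(p x)), o ++ l.filter p) := by
  induction l generalizing j o with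
  | nil => simp
  | cons a t ih =>
    by_cases h : p a = true <;>
      simp only [List.foldl_cons, List.filter_cons, h, Bool.not_true, Bool.not_false, ih,
        List.append_assoc, List.singleton_append, Bool.false_eq_true, ite_true, ite_false]

-- parity of members of the filters, stated with pvLe in mind
theorem odd_before_even {a b : Int} (ha : a % 2 ≠ 0) (hb : b % 2 = 0) : pvLe a b :=
  Or.inl ((pvBefore_iff a b).mpr (Or.inl ⟨ha, Or.inl hb⟩))

theorem odd_le {a b : Int} (ha : a % 2 ≠ 0) (h : a ≤ b) : pvLe a b := by
  rcases eq_or_lt_of_le h with rfl | h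
  · exact Or.inr rfl
  · exact Or.inl ((pvBefore_iff a b).mpr (Or.inl ⟨ha, Or.inr h⟩))

theorem even_ge {a b : Int} (ha : a % 2 = 0) (hb : b % 2 = 0) (h : b ≤ a) : pvLe a b := by
  rcases eq_or_lt_of_le h with rfl | h
  · exact Or.inr rfl
  · exact Or.inl ((pvBefore_iff a b).mpr (Or.inr ⟨ha, hb, h⟩))

-- A's result is Pairwise pvLe
theorem funcA_pairwise (lst : List Int) :
    ((PySem.List.sorted (lst.filter (fun x => !(PySem.Int.mod x 2 == 0))) (fun x => x) false) ++
      (PySem.List.sorted (lst.filter (fun x => PySem.Int.mod x 2 == 0)) (fun x => x) true)).Pairwise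
      pvLe := by
  have hodd : ∀ a ∈ PySem.List.sorted (lst.filter (fun x => !(PySem.Int.mod x 2 == 0)))
      (fun x => x) false, a % 2 ≠ 0 := by
    intro a ha
    have := (PySem.List.mem_sorted ..).mp ha
    have := List.of_mem_filter this
    simpa [PySem.Int.mod, Int.fmod_eq_emod] using this
  have heven : ∀ a ∈ PySem.List.sorted (lst.filter (fun x => PySem.Int.mod x 2 == 0))
      (fun x => x) true, a % 2 = 0 := by
    intro a ha
    have := (PySem.List.mem_sorted ..).mp ha
    have := List.of_mem_filter this
    simpa [PySem.Int.mod, Int.fmod_eq_emod] using this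
  refine List.pairwise_append.mpr ⟨?_, ?_, ?_⟩
  · refine List.Pairwise.imp_of_mem ?_ (PySem.List.sorted_pairwise ..)
    intro a b ha hb h
    exact odd_le (hodd a ha) h
  · refine List.Pairwise.imp_of_mem ?_ (PySem.List.sorted_pairwise_rev ..)
    intro a b ha hb h
    exact even_ge (heven a ha) (heven b hb) h
  · intro a ha b hb
    exact odd_before_even (hodd a ha) (heven b hb)

-- ===== VERDICT (by name: the statement is the Claim_ definition above) =====
theorem func7_spec : Claim_equal_func7 := by
  intro lst _
  show func7 lst = func7_alt lst
  rcases eq_or_ne lst [] with h | h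
  · subst h; rw [func7_alt]; rfl
  · have hb : (lst == []) = false := by simpa using h
    simp only [func7, hb, Bool.false_eq_true, if_false,
      func7_loop (fun i => PySem.Int.mod i 2 == 0), List.nil_append]
    refine List.Perm.eq_of_pairwise
      (fun a b _ _ h1 h2 => pvLe_antisymm a b h1 h2) (funcA_pairwise lst)
      (func7_alt_pairwise lst) ?_
    have hperm : ((lst.filter (fun x => !(PySem.Int.mod x 2 == 0))) ++
        (lst.filter (fun x => PySem.Int.mod x 2 == 0))).Perm lst := by
      have := List.filter_append_perm (fun x => PySem.Int.mod x 2 == 0) lst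
      exact (List.perm_append_comm.trans this)
    exact (((PySem.List.sorted_perm ..).append (PySem.List.sorted_perm ..)).trans
      hperm).trans (func7_alt_perm lst).symm
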